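-- pv_equiv track=rewrite | github.com/AdamZhouSE/pythonHomework | Code/CodeRecords/2841/60608/262618.py | go
-- ===== SOURCE A (Python) =====
-- def go(arr: list, op: str):
--     if len(arr) == 1:
--         return arr[0]
--     else:
--         n = len(arr)
--         t = []
--         if op == "|":
--             for i in range(0, n, 2):
--                 t.append(arr[i] | arr[i + 1])
--             return go(t[:], "^")
--         else:
--             for i in range(0, n, 2):
--                 t.append(arr[i] ^ arr[i + 1])
--             return go(t[:], "|")
-- ===== SOURCE B (Python) =====
-- def go(arr: list, op: str):
--     a = arr
--     while len(a) != 1: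
--         nxt = []
--         pending = None
--         for x in a:
--             if pending is None:
--                 pending = x
--             else:
--                 nxt.append(pending | x if op == "|" else pending ^ x)
--                 pending = None
--         a = nxt
--         op = "^" if op == "|" else "|"
--     return a[0]
-- ===== Notes on version B (the rewrite author's own statement) =====
-- stated objective: alternative
-- what changed: Replaced A's recursion with two per-operator index loops (range(0,n,2) with arr[i], arr[i+1]) by an iterative while loop whose single pass pairs adjacent elements through a one-element pending buffer and toggles the operator each round.
-- outside the precondition, e.g. on go([1, 2, 3], '|'): A raises IndexError, B returns 3; on go([], '|'): A raises RecursionError, B does not finish within the time limit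
import Mathlib
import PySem

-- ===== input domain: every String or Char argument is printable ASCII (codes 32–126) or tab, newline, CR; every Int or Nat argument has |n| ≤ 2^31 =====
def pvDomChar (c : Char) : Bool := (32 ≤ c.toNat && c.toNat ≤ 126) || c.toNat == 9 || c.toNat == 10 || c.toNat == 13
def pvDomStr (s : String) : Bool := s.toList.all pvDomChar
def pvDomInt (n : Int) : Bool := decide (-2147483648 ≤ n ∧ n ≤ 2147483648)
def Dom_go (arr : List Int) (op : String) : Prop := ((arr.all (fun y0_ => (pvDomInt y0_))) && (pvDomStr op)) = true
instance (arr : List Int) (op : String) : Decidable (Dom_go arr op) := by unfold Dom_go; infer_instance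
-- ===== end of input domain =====

-- B replaces A's recursive descent with two index loops by a single while loop whose
-- inner pass pairs adjacent elements via a one-element buffer (same cost, different
-- decomposition); equivalence is about the return value only (neither mutates `arr`).

-- ===== PORT A =====
-- fuel `arr.length + 1` only makes the Python recursion structural; on Pre_go the
-- recursion depth is log2(len)+1 ≤ len < fuel, so the fuel-0 fallback is never reached.
def goGo : Nat → List Int → String → Int
  | 0, _, _ => 0
  | fuel+1, arr, op =>
    if arr.length = 1 then PySem.List.pyGetD arr 0 0
    else
      let n : Int := arr.length
      if op = "|" then
        let t := (PySem.List.pyRange 0 n 2).foldl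
          (fun t i => t ++ [PySem.Int.bor (PySem.List.pyGetD arr i 0) (PySem.List.pyGetD arr (i+1) 0)]) []
        goGo fuel t "^"
      else
        let t := (PySem.List.pyRange 0 n 2).foldl
          (fun t i => t ++ [PySem.Int.bxor (PySem.List.pyGetD arr i 0) (PySem.List.pyGetD arr (i+1) 0)]) []
        goGo fuel t "|"

def go (arr : List Int) (op : String) : Int := goGo (arr.length + 1) arr op

-- ===== PORT B =====
-- one pass of B's while-loop body: fold over the list with a (pending, nxt) buffer state
def goAltPass (a : List Int) (op : String) : Option Int × List Int :=
  a.foldl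
    (fun st x =>
      match st.1 with
      | none => (some x, st.2)
      | some pending => (none, st.2 ++ [if op = "|" then PySem.Int.bor pending x else PySem.Int.bxor pending x]))
    ((none : Option Int), ([] : List Int))

-- the while loop, with the same harmless fuel bound as A's port
def goAltLoop : Nat → List Int → String → Int
  | 0, a, _ => PySem.List.pyGetD a 0 0
  | fuel+1, a, op =>
    if a.length = 1 then PySem.List.pyGetD a 0 0
    else goAltLoop fuel (goAltPass a op).2 (if op = "|" then "^" else "|")

def go_alt (arr : List Int) (op : String) : Int := goAltLoop (arr.length + 1) arr op

-- ===== PRECONDITION & SPEC =====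
-- Pre_go: arr's length is a power of two (so ≥ 1). On any other length Python A raises
-- (IndexError at some level's odd length, RecursionError on []), returning no value.
def Pre_go (arr : List Int) (op : String) : Prop :=
  0 < arr.length ∧ arr.length = 2 ^ Nat.log2 arr.length
instance (arr : List Int) (op : String) : Decidable (Pre_go arr op) := by
  unfold Pre_go; infer_instance
def pvWitness_go : List Int × String := ([3, 5, 1, 2], "|")

def Spec_go (arr : List Int) (op : String) (out : Int) : Prop := out = go_alt arr op
instance (arr : List Int) (op : String) (out : Int) : Decidable (Spec_go arr op out) := by unfold Spec_go; infer_instance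

-- ===== CLAIM (what is proved, stated in full; the proofs are below) =====
def Claim_equal_go : Prop := ∀ (arr : List Int) (op : String), Dom_go arr op → Pre_go arr op → Spec_go arr op (go arr op)

-- ===== LEMMAS AND PROOFS =====

/-- The canonical pairwise combination both loop bodies compute. -/
def pairsOf (comb : Int → Int → Int) : List Int → List Int
  | x :: y :: rest => comb x y :: pairsOf comb rest
  | _ => []

theorem length_pairsOf (comb : Int → Int → Int) :
    ∀ (m : Nat) (arr : List Int), arr.length = 2 * m → (pairsOf comb arr).length = m := by
  intro m
  induction m with
  | zero => intro arr h; match arr, h with | [], _ => simp [pairsOf]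
  | succ m ih =>
    intro arr h
    match arr with
    | x :: y :: rest =>
      simp only [List.length_cons] at h
      simp [pairsOf, ih rest (by omega)]

theorem map_range_pairsOf (comb : Int → Int → Int) :
    ∀ (m : Nat) (arr : List Int), arr.length = 2 * m →
      (List.range m).map (fun k => comb (arr.getD (2 * k) 0) (arr.getD (2 * k + 1) 0))
        = pairsOf comb arr := by
  intro m
  induction m with
  | zero => intro arr h; match arr, h with | [], _ => simp [pairsOf]
  | succ m ih =>
    intro arr h
    match arr with
    | x :: y :: rest =>
      simp only [List.length_cons] at h
      rw [List.range_succ_eq_map]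
      simp only [List.map_cons, List.map_map]
      have : ((List.range m).map
          (fun k => comb ((x :: y :: rest).getD (2 * (k + 1)) 0)
            ((x :: y :: rest).getD (2 * (k + 1) + 1) 0)))
          = (List.range m).map (fun k => comb (rest.getD (2 * k) 0) (rest.getD (2 * k + 1) 0)) := by
        refine List.map_congr_left ?_
        intro k _
        have h1 : 2 * (k + 1) = (2 * k) + 1 + 1 := by omega
        have h2 : 2 * (k + 1) + 1 = (2 * k + 1) + 1 + 1 := by omega
        simp [h1]
      simp only [Function.comp_def]
      rw [this, ih rest (by omega)]
      simp [pairsOf]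

/-- A's loop body over `range(0, n, 2)` builds exactly `pairsOf comb arr`. -/
theorem foldA_eq_pairsOf (comb : Int → Int → Int) (m : Nat) (arr : List Int)
    (h : arr.length = 2 * m) :
    (PySem.List.pyRange 0 (arr.length : Int) 2).foldl
      (fun t i => t ++ [comb (PySem.List.pyGetD arr i 0) (PySem.List.pyGetD arr (i + 1) 0)]) []
      = pairsOf comb arr := by
  rw [PySem.List.foldl_append_singleton_eq_map, List.nil_append,
    PySem.List.pyRange_of_pos 0 (arr.length : Int) (by norm_num : (0:Int) < 2)]
  have hcount : (if (0:Int) < (arr.length : Int) then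
      ((((arr.length : Int)) - 0 + 2 - 1) / 2).toNat else 0) = m := by
    rw [h]; push_cast
    by_cases hm : m = 0
    · simp [hm]
    · rw [if_pos (by omega)]
      omega
  rw [hcount, List.map_map]
  rw [← map_range_pairsOf comb m arr h]
  refine List.map_congr_left ?_
  intro k _
  have e1 : (0 : Int) + 2 * (k : Int) = ((2 * k : Nat) : Int) := by push_cast; ring
  have e2 : ((2 * k : Nat) : Int) + 1 = ((2 * k + 1 : Nat) : Int) := by norm_cast
  simp only [Function.comp_def, e1, e2, PySem.List.pyGetD_natCast]

/-- B's inner pass over an even-length list ends with an empty buffer and `pairsOf`. -/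
theorem foldB_eq_pairsOf (op : String) :
    ∀ (m : Nat) (arr : List Int) (acc : List Int),
      arr.length = 2 * m →
      arr.foldl
        (fun st x =>
          match st.1 with
          | none => (some x, st.2)
          | some pending => (none, st.2 ++ [if op = "|" then PySem.Int.bor pending x else PySem.Int.bxor pending x]))
        ((none : Option Int), acc)
        = (none, acc ++ pairsOf (fun p x => if op = "|" then PySem.Int.bor p x else PySem.Int.bxor p x) arr) := by
  intro m
  induction m with
  | zero => intro arr acc h; match arr, h with | [], _ => simp [pairsOf]
  | succ m ih =>
    intro arr acc h
    match arr with
    | x :: y :: rest =>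
      simp only [List.length_cons] at h
      simp only [List.foldl_cons]
      rw [ih rest (acc ++ [if op = "|" then PySem.Int.bor x y else PySem.Int.bxor x y]) (by omega)]
      simp [pairsOf]

theorem goGo_eq_goAltLoop :
    ∀ (k fa fb : Nat) (arr : List Int) (op : String),
      arr.length = 2 ^ k → k < fa → k < fb → goGo fa arr op = goAltLoop fb arr op := by
  intro k
  induction k with
  | zero =>
    intro fa fb arr op h hfa hfb
    match fa, fb with
    | fa + 1, fb + 1 => simp [goGo, goAltLoop, h]
  | succ k ih =>
    intro fa fb arr op h hfa hfb
    match fa, fb with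
    | fa + 1, fb + 1 =>
      have hne : arr.length ≠ 1 := by
        rw [h]; have : 2 ^ (k + 1) = 2 * 2 ^ k := by ring
        have := Nat.one_le_two_pow (n := k); omega
      have hm : arr.length = 2 * 2 ^ k := by rw [h]; ring
      by_cases hop : op = "|"
      · simp only [goGo, goAltLoop, if_neg hne, hop]
        rw [foldA_eq_pairsOf (fun p x => PySem.Int.bor p x) (2 ^ k) arr hm,
          goAltPass, foldB_eq_pairsOf "|" (2 ^ k) arr [] hm]
        simp only [List.nil_append]
        exact ih fa fb _ "^" (length_pairsOf _ (2 ^ k) arr hm) (by omega) (by omega)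
      · simp only [goGo, goAltLoop, if_neg hne, if_neg hop]
        rw [foldA_eq_pairsOf (fun p x => PySem.Int.bxor p x) (2 ^ k) arr hm,
          goAltPass, foldB_eq_pairsOf op (2 ^ k) arr [] hm]
        have hpair : pairsOf (fun p x => if op = "|" then PySem.Int.bor p x else PySem.Int.bxor p x) arr
            = pairsOf (fun p x => PySem.Int.bxor p x) arr := by simp [hop]
        simp only [List.nil_append, hpair]
        exact ih fa fb _ "|" (length_pairsOf _ (2 ^ k) arr hm) (by omega) (by omega)

-- ===== VERDICT (by name: the statement is the Claim_ definition above) =====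
theorem go_spec : Claim_equal_go := by
  intro arr op _ hpre
  obtain ⟨hpos, hlen⟩ := hpre
  unfold Spec_go go go_alt
  exact goGo_eq_goAltLoop (Nat.log2 arr.length) _ _ arr op hlen
    (by have := Nat.log2_lt (n := arr.length) (by omega) |>.mpr
          (by rw [hlen]; exact Nat.lt_two_pow_self)
        omega)
    (by have := Nat.log2_lt (n := arr.length) (by omega) |>.mpr
          (by rw [hlen]; exact Nat.lt_two_pow_self)
        omega)
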